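-- pv_equiv track=rewrite | github.com/volcengine/verl | atropos/environments/intern_bootcamp/internbootcamp_lib/internbootcamp/bootcamp/cparty/cparty.py | _calculate_optimal_solution
-- ===== SOURCE A (Python) =====
-- def _calculate_optimal_solution(n, edges):
--     """基于位运算的高效算法（参考原题解）"""
--     if n == 1:
--         return 0, []
--
--     # 转换为0-based邻接表
--     adj = [0] * n
--     for u, v in edges:
--         u_idx = u - 1
--         v_idx = v - 1
--         adj[u_idx] |= 1 << v_idx
--         adj[v_idx] |= 1 << u_idx
--
--     # 添加自环
--     for i in range(n):
--         adj[i] |= 1 << i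
--
--     # 预处理覆盖关系
--     full_mask = (1 << n) - 1
--     if all(mask == full_mask for mask in adj):
--         return 0, []
--
--     # 初始化neigh数组
--     max_mask = 1 << n
--     coverage = [0] * max_mask
--     for i in range(n):
--         coverage[1 << i] = adj[i]
--
--     # 预处理所有mask的覆盖关系
--     for mask in range(max_mask):
--         for i in range(n):
--             if (mask & (1 << i)) and (coverage[mask ^ (1 << i)] & (1 << i)):
--                 coverage[mask] = coverage[mask ^ (1 << i)] | adj[i]
--
--     # 寻找最小集合
--     best_mask = full_mask
--     min_steps = n
--     for mask in range(max_mask):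
--         if coverage[mask] == full_mask:
--             cnt = bin(mask).count('1')
--             if cnt < min_steps:
--                 min_steps = cnt
--                 best_mask = mask
--
--     solution = [i+1 for i in range(n) if (best_mask & (1 << i))]
--     return min_steps, solution
-- ===== SOURCE B (Python) =====
-- def _calculate_optimal_solution(n, edges):
--     """Same result via a split DP: plain union coverage + separate viability DP."""
--     if n == 1:
--         return 0, []
--
--     adj = [0] * n
--     for u, v in edges:
--         adj[u - 1] |= 1 << (v - 1)
--         adj[v - 1] |= 1 << (u - 1)
--     for i in range(n):
--         adj[i] |= 1 << i
--
--     full = (1 << n) - 1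
--     if all(a == full for a in adj):
--         return 0, []
--
--     max_mask = 1 << n
--     # coverage of a set = plain union of closed neighborhoods, peeled by highest bit
--     cov = [0] * max_mask
--     for m in range(1, max_mask):
--         h = m.bit_length() - 1
--         cov[m] = cov[m ^ (1 << h)] | adj[h]
--     # viability of a set, as a separate boolean DP:
--     # a set is viable iff it is a single vertex, or some member is dominated by
--     # the coverage of the rest and the rest is itself viable
--     good = [False] * max_mask
--     for m in range(1, max_mask):
--         if m & (m - 1) == 0:
--             good[m] = True
--         else:
--             good[m] = any(m & (1 << i)
--                           and good[m ^ (1 << i)]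
--                           and (cov[m ^ (1 << i)] >> i) & 1
--                           for i in range(n))
--     cands = [m for m in range(max_mask) if good[m] and cov[m] == full]
--     if not cands:
--         return n, list(range(1, n + 1))
--     best = min(cands, key=lambda m: (bin(m).count('1'), m))
--     return bin(best).count('1'), [i + 1 for i in range(n) if best & (1 << i)]
-- ===== Notes on version B (the rewrite author's own statement) =====
-- stated objective: alternative
-- what changed: A's single fused coverage table (conditional overwrite mixing viability and coverage, last valid writer wins) is split into two independent DPs - a plain closed-neighborhood-union table peeled by the highest bit and a separate boolean viability table - followed by an explicit min over the candidate masks instead of A's running strict-improvement scan.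
import Mathlib
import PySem

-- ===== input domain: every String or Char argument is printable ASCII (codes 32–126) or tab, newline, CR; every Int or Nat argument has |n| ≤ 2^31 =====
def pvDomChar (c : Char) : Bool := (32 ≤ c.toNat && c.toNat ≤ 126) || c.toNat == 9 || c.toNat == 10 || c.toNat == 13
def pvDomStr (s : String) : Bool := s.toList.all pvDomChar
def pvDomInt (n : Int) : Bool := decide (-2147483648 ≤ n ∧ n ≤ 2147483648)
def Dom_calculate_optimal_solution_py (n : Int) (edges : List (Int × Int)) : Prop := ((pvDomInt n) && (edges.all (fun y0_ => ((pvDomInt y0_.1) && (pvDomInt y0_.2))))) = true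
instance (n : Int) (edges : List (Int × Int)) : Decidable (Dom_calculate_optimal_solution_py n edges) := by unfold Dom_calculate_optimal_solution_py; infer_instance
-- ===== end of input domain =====

-- B splits A's fused conditional coverage DP (overwrite, last valid writer wins) into two
-- independent tables — a plain closed-neighborhood-union table peeled by the highest bit and a
-- boolean viability DP — then takes an explicit minimum over the candidate masks ("alternative").

-- ===== PORT A =====
-- helpers mirror contiguous chunks of the Python; pvShl/pvShr pin Python's shifts to Int <<< Nat
def pvShl (x : Int) (k : Nat) : Int := x <<< k
def pvShr (x : Int) (k : Nat) : Int := x >>> k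

-- adj = [0]*n; for u,v in edges: adj[u-1] |= 1<<(v-1); adj[v-1] |= 1<<(u-1); for i in range(n): adj[i] |= 1<<i
def pvAdjA (n : Int) (edges : List (Int × Int)) : List Int :=
  (PySem.List.pyRange 0 n 1).foldl (fun a i =>
      PySem.List.pySetD a i (PySem.Int.bor (PySem.List.pyGetD a i 0) (pvShl 1 i.toNat)))
    (edges.foldl (fun a uv =>
      let u_idx : Int := uv.1 - 1
      let v_idx : Int := uv.2 - 1
      let a := PySem.List.pySetD a u_idx (PySem.Int.bor (PySem.List.pyGetD a u_idx 0) (pvShl 1 v_idx.toNat))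
      PySem.List.pySetD a v_idx (PySem.Int.bor (PySem.List.pyGetD a v_idx 0) (pvShl 1 u_idx.toNat)))
      (List.replicate n.toNat 0))

-- coverage = [0]*max_mask; for i in range(n): coverage[1<<i] = adj[i]; then the fused DP over all masks
def pvCovA (n : Int) (adj : List Int) : List Int :=
  (PySem.List.pyRange 0 (pvShl 1 n.toNat) 1).foldl (fun c mask =>
      (PySem.List.pyRange 0 n 1).foldl (fun c i =>
        if (PySem.Int.band mask (pvShl 1 i.toNat) != 0 &&
            PySem.Int.band (PySem.List.pyGetD c (PySem.Int.bxor mask (pvShl 1 i.toNat)) 0) (pvShl 1 i.toNat) != 0)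
        then PySem.List.pySetD c mask (PySem.Int.bor (PySem.List.pyGetD c (PySem.Int.bxor mask (pvShl 1 i.toNat)) 0) (PySem.List.pyGetD adj i 0))
        else c) c)
    ((PySem.List.pyRange 0 n 1).foldl (fun c i =>
        PySem.List.pySetD c (pvShl 1 i.toNat) (PySem.List.pyGetD adj i 0))
      (List.replicate (pvShl 1 n.toNat).toNat 0))

-- best_mask = full_mask; min_steps = n; the strict-improvement scan
def pvScanA (n : Int) (coverage : List Int) : Int × Int :=
  (PySem.List.pyRange 0 (pvShl 1 n.toNat) 1).foldl (fun (st : Int × Int) mask =>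
      if PySem.List.pyGetD coverage mask 0 == pvShl 1 n.toNat - 1 then
        (if ((PySem.Int.bitCount mask : Int)) < st.1 then ((PySem.Int.bitCount mask : Int), mask) else st)
      else st) (n, pvShl 1 n.toNat - 1)

-- [i+1 for i in range(n) if best_mask & (1 << i)]
def pvSolA (n best : Int) : List Int :=
  ((PySem.List.pyRange 0 n 1).filter (fun i => PySem.Int.band best (pvShl 1 i.toNat) != 0)).map (fun i => i + 1)

def calculate_optimal_solution_py (n : Int) (edges : List (Int × Int)) : Int × List Int :=
  if n = 1 then (0, []) else
  if (pvAdjA n edges).all (fun m => m == pvShl 1 n.toNat - 1) then (0, []) else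
  ((pvScanA n (pvCovA n (pvAdjA n edges))).1,
   pvSolA n (pvScanA n (pvCovA n (pvAdjA n edges))).2)

-- ===== PORT B =====
-- same input parsing as Source B's first lines
def pvAdjB (n : Int) (edges : List (Int × Int)) : List Int :=
  (PySem.List.pyRange 0 n 1).foldl (fun a i =>
      PySem.List.pySetD a i (PySem.Int.bor (PySem.List.pyGetD a i 0) (pvShl 1 i.toNat)))
    (edges.foldl (fun a uv =>
      let u_idx : Int := uv.1 - 1
      let v_idx : Int := uv.2 - 1
      let a := PySem.List.pySetD a u_idx (PySem.Int.bor (PySem.List.pyGetD a u_idx 0) (pvShl 1 v_idx.toNat))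
      PySem.List.pySetD a v_idx (PySem.Int.bor (PySem.List.pyGetD a v_idx 0) (pvShl 1 u_idx.toNat)))
      (List.replicate n.toNat 0))

-- cov[m] = cov[m ^ (1 << h)] | adj[h], h the highest set bit of m
def pvCovB (n : Int) (adj : List Int) : List Int :=
  (PySem.List.pyRange 1 (pvShl 1 n.toNat) 1).foldl (fun c m =>
      let h : Int := (PySem.Int.bitLength m : Int) - 1
      PySem.List.pySetD c m (PySem.Int.bor (PySem.List.pyGetD c (PySem.Int.bxor m (pvShl 1 h.toNat)) 0) (PySem.List.pyGetD adj h 0)))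
    (List.replicate (pvShl 1 n.toNat).toNat 0)

-- good[m]: singletons are viable; else some member dominated by the rest, with the rest viable
def pvGoodB (n : Int) (cov : List Int) : List Bool :=
  (PySem.List.pyRange 1 (pvShl 1 n.toNat) 1).foldl (fun g m =>
      if PySem.Int.band m (m - 1) == 0 then PySem.List.pySetD g m true
      else PySem.List.pySetD g m ((PySem.List.pyRange 0 n 1).any (fun i =>
          PySem.Int.band m (pvShl 1 i.toNat) != 0 &&
          PySem.List.pyGetD g (PySem.Int.bxor m (pvShl 1 i.toNat)) false &&
          PySem.Int.band (pvShr (PySem.List.pyGetD cov (PySem.Int.bxor m (pvShl 1 i.toNat)) 0) i.toNat) 1 != 0)))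
    (List.replicate (pvShl 1 n.toNat).toNat false)

-- min(cands, key=lambda m: (bin(m).count('1'), m)); min2? is none exactly when cands is empty
def pvBestB (n : Int) (cov : List Int) (good : List Bool) : Option Int :=
  PySem.List.min2? ((PySem.List.pyRange 0 (pvShl 1 n.toNat) 1).filter (fun m =>
      PySem.List.pyGetD good m false && (PySem.List.pyGetD cov m 0 == pvShl 1 n.toNat - 1)))
    (fun m => (PySem.Int.bitCount m : Int)) (fun m => m)

def pvSolB (n best : Int) : List Int :=
  ((PySem.List.pyRange 0 n 1).filter (fun i => PySem.Int.band best (pvShl 1 i.toNat) != 0)).map (fun i => i + 1)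

def calculate_optimal_solution_py_alt (n : Int) (edges : List (Int × Int)) : Int × List Int :=
  if n = 1 then (0, []) else
  if (pvAdjB n edges).all (fun m => m == pvShl 1 n.toNat - 1) then (0, []) else
  match pvBestB n (pvCovB n (pvAdjB n edges)) (pvGoodB n (pvCovB n (pvAdjB n edges))) with
  | none => (n, PySem.List.pyRange 1 (n + 1) 1)
  | some best => ((PySem.Int.bitCount best : Int), pvSolB n best)

-- ===== PRECONDITION & SPEC =====
-- Pre_ excludes exactly the inputs on which A raises: a negative n (ValueError on a negative
-- shift), or an edge endpoint outside 1..n (IndexError, or ValueError on a negative shift);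
-- n == 1 returns before edges are touched and is admitted unconditionally.
def Pre_calculate_optimal_solution_py (n : Int) (edges : List (Int × Int)) : Prop :=
  n = 1 ∨ (0 ≤ n ∧ ∀ p ∈ edges, 1 ≤ p.1 ∧ p.1 ≤ n ∧ 1 ≤ p.2 ∧ p.2 ≤ n)
instance (n : Int) (edges : List (Int × Int)) : Decidable (Pre_calculate_optimal_solution_py n edges) := by unfold Pre_calculate_optimal_solution_py; infer_instance
def pvWitness_calculate_optimal_solution_py : Int × (List (Int × Int)) := (3, [(1, 2), (2, 3)])
def Spec_calculate_optimal_solution_py (n : Int) (edges : List (Int × Int)) (out : Int × List Int) : Prop := out = calculate_optimal_solution_py_alt n edges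
instance (n : Int) (edges : List (Int × Int)) (out : Int × List Int) : Decidable (Spec_calculate_optimal_solution_py n edges out) := by unfold Spec_calculate_optimal_solution_py; infer_instance

-- ===== CLAIM (what is proved, stated in full; the proofs are below) =====
def Claim_equal_calculate_optimal_solution_py : Prop := ∀ (n : Int) (edges : List (Int × Int)), Dom_calculate_optimal_solution_py n edges → Pre_calculate_optimal_solution_py n edges → Spec_calculate_optimal_solution_py n edges (calculate_optimal_solution_py n edges)

-- ===== LEMMAS AND PROOFS =====

theorem pvGetD_set (l : List Int) (i j : Nat) (v : Int) :
    (l.set i v).getD j 0 = if j = i ∧ i < l.length then v else l.getD j 0 := by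
  simp [List.getD_eq_getElem?_getD, List.getElem?_set]
  by_cases h : i = j
  · subst h; simp; split <;> simp_all
  · have h' : ¬ j = i := fun hh => h hh.symm
    simp [h, h']

theorem pvGetD_set_bool (l : List Bool) (i j : Nat) (v : Bool) :
    (l.set i v).getD j false = if j = i ∧ i < l.length then v else l.getD j false := by
  simp [List.getD_eq_getElem?_getD, List.getElem?_set]
  by_cases h : i = j
  · subst h; simp; split <;> simp_all
  · have h' : ¬ j = i := fun hh => h hh.symm
    simp [h, h']

theorem pvTestBit_between (x k : Nat) (h1 : 2^k ≤ x) (h2 : x < 2^(k+1)) : x.testBit k = true := by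
  have hp : 0 < 2^k := Nat.pow_pos (by norm_num)
  have e1 : 1 ≤ x / 2^k := (Nat.one_le_div_iff hp).2 h1
  have e2 : x / 2^k < 2 := (Nat.div_lt_iff_lt_mul hp).2 (by rw [pow_succ] at h2; omega)
  have : x / 2^k = 1 := by omega
  simp [Nat.testBit, Nat.shiftRight_eq_div_pow, this]

theorem pvTestBit_xor_pow (m i j : Nat) :
    (m ^^^ 2^i).testBit j = if j = i then !(m.testBit i) else m.testBit j := by
  by_cases h : j = i
  · subst h; simp [Nat.testBit_xor, Nat.testBit_two_pow]
  · have h' : ¬ i = j := fun hh => h hh.symm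
    simp [Nat.testBit_xor, Nat.testBit_two_pow, h, h']

theorem pvXor_pow_lt (m i : Nat) (h : m.testBit i = true) : m ^^^ 2^i < m := by
  apply Nat.lt_of_testBit i
  · simp [pvTestBit_xor_pow, h]
  · exact h
  · intro j hj
    rw [pvTestBit_xor_pow]
    have : ¬ j = i := by omega
    simp [this]

theorem pvPow2_of_and_pred (m : Nat) (h0 : m ≠ 0) (h : m &&& (m-1) = 0) : m = 2 ^ m.log2 := by
  by_contra hne
  have h1 : 2 ^ m.log2 ≤ m := Nat.log2_self_le h0
  have h2 : m < 2 ^ (m.log2 + 1) := Nat.lt_log2_self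
  have hgt : 2 ^ m.log2 < m := lt_of_le_of_ne h1 (fun e => hne e.symm)
  have hm1 : 2 ^ m.log2 ≤ m - 1 := by omega
  have hm2 : m - 1 < 2 ^ (m.log2 + 1) := by omega
  have b1 : m.testBit m.log2 = true := pvTestBit_between _ _ h1 h2
  have b2 : (m-1).testBit m.log2 = true := pvTestBit_between _ _ hm1 hm2
  have : (m &&& (m-1)).testBit m.log2 = true := by simp [Nat.testBit_and, b1, b2]
  rw [h] at this; simp at this

theorem pvAnd_pred_two_pow (i : Nat) : 2^i &&& (2^i - 1) = 0 := by
  apply Nat.eq_of_testBit_eq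
  intro j
  simp [Nat.testBit_and, Nat.testBit_two_pow, Nat.testBit_two_pow_sub_one]
-- depends on l1
def pvUL (adjN : List Nat) (L : List Nat) (m : Nat) : Nat :=
  L.foldr (fun i a => (if m.testBit i then adjN.getD i 0 else 0) ||| a) 0

def pvU (adjN : List Nat) (m : Nat) : Nat := pvUL adjN (List.range adjN.length) m

theorem pvUL_testBit (adjN : List Nat) (L : List Nat) (m j : Nat) :
    (pvUL adjN L m).testBit j = L.any (fun i => m.testBit i && (adjN.getD i 0).testBit j) := by
  induction L with
  | nil => simp [pvUL]
  | cons x t ih =>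
    simp only [pvUL, List.foldr_cons, List.any_cons, Nat.testBit_lor]
    rw [show (t.foldr (fun i a => (if m.testBit i then adjN.getD i 0 else 0) ||| a) 0) = pvUL adjN t m from rfl, ih]
    by_cases hx : m.testBit x <;> simp [hx]

theorem pvU_testBit (adjN : List Nat) (m j : Nat) :
    (pvU adjN m).testBit j = (List.range adjN.length).any (fun i => m.testBit i && (adjN.getD i 0).testBit j) :=
  pvUL_testBit _ _ _ _

theorem pvU_zero (adjN : List Nat) : pvU adjN 0 = 0 := by
  apply Nat.eq_of_testBit_eq; intro j
  simp [pvU_testBit]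

theorem pvU_insert (adjN : List Nat) (m i : Nat) (hi : i < adjN.length) (h : m.testBit i = true) :
    pvU adjN (m ^^^ 2^i) ||| adjN.getD i 0 = pvU adjN m := by
  apply Nat.eq_of_testBit_eq; intro j
  rw [Bool.eq_iff_iff]
  simp only [Nat.testBit_lor, pvU_testBit, Bool.or_eq_true, List.any_eq_true, List.mem_range,
    Bool.and_eq_true]
  constructor
  · rintro (⟨k, hk, hb1, hb2⟩ | hb)
    · rw [pvTestBit_xor_pow] at hb1
      by_cases hki : k = i
      · rw [if_pos hki, h] at hb1; exact absurd hb1 (by simp)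
      · rw [if_neg hki] at hb1
        exact ⟨k, hk, hb1, hb2⟩
    · exact ⟨i, hi, h, hb⟩
  · rintro ⟨k, hk, hb1, hb2⟩
    by_cases hki : k = i
    · subst hki; exact Or.inr hb2
    · exact Or.inl ⟨k, hk, by rw [pvTestBit_xor_pow, if_neg hki]; exact hb1, hb2⟩

theorem pvU_two_pow (adjN : List Nat) (i : Nat) (hi : i < adjN.length) :
    pvU adjN (2^i) = adjN.getD i 0 := by
  have := pvU_insert adjN (2^i) i hi (by simp [Nat.testBit_two_pow])
  rw [Nat.xor_self] at this
  rw [← this, pvU_zero]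
  simp

def pvGoodF (adjN : List Nat) : Nat → Nat → Bool
  | 0, _ => false
  | f+1, m =>
    if m = 0 then false
    else if m &&& (m-1) = 0 then true
    else (List.range adjN.length).any (fun i =>
      m.testBit i && pvGoodF adjN f (m ^^^ 2^i) && (pvU adjN (m ^^^ 2^i)).testBit i)

def pvGood (adjN : List Nat) (m : Nat) : Bool := pvGoodF adjN m m

theorem pvAny_congr_mem {l : List Nat} {p q : Nat → Bool} (h : ∀ a ∈ l, p a = q a) :
    l.any p = l.any q := by
  induction l with
  | nil => rfl
  | cons x t ih =>
    simp only [List.any_cons]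
    rw [h x (by simp), ih (fun a ha => h a (by simp [ha]))]

theorem pvGoodF_congr (adjN : List Nat) : ∀ m f1 f2, m ≤ f1 → m ≤ f2 → pvGoodF adjN f1 m = pvGoodF adjN f2 m := by
  intro m
  induction m using Nat.strong_induction_on with
  | _ m IH =>
    intro f1 f2 h1 h2
    match m, f1, f2 with
    | 0, 0, 0 => rfl
    | 0, 0, g+1 => simp [pvGoodF]
    | 0, g+1, 0 => simp [pvGoodF]
    | 0, g+1, g'+1 => simp [pvGoodF]
    | m+1, g+1, g'+1 =>
      show pvGoodF adjN (g+1) (m+1) = pvGoodF adjN (g'+1) (m+1)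
      by_cases hp : (m+1) &&& m = 0
      · simp [pvGoodF, hp]
      simp only [pvGoodF]
      simp only [Nat.add_sub_cancel, hp]
      simp only [if_false, Nat.succ_ne_zero]
      apply pvAny_congr_mem
      intro i _
      by_cases hb : (m+1).testBit i
      · have hlt : (m+1) ^^^ 2^i < m+1 := pvXor_pow_lt _ _ hb
        rw [IH _ hlt g g' (by omega) (by omega)]
      · simp [hb]

theorem pvGood_unfold (adjN : List Nat) (m : Nat) :
    pvGood adjN m = (if m = 0 then false
      else if m &&& (m-1) = 0 then true
      else (List.range adjN.length).any (fun i =>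
        m.testBit i && pvGood adjN (m ^^^ 2^i) && (pvU adjN (m ^^^ 2^i)).testBit i)) := by
  cases m with
  | zero => simp [pvGood, pvGoodF]
  | succ k =>
    show pvGoodF adjN (k+1) (k+1) = _
    by_cases hp : (k+1) &&& k = 0
    · simp [pvGoodF, hp]
    simp only [pvGoodF]
    simp only [Nat.add_sub_cancel, hp]
    simp only [if_false, Nat.succ_ne_zero]
    apply pvAny_congr_mem
    intro i _
    by_cases hb : (k+1).testBit i
    · have hlt : (k+1) ^^^ 2^i < k+1 := pvXor_pow_lt _ _ hb
      rw [pvGoodF_congr adjN ((k+1) ^^^ 2^i) k ((k+1) ^^^ 2^i) (by omega) (by omega)]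
      rfl
    · simp [hb]

theorem pvGood_zero (adjN : List Nat) : pvGood adjN 0 = false := by simp [pvGood, pvGoodF]

def pvCovSpec (adjN : List Nat) (m : Nat) : Int :=
  if pvGood adjN m then ((pvU adjN m : Nat) : Int) else 0

-- bitCount facts
def pvCnt (m : Nat) : Nat := PySem.Int.bitCount (m : Int)

theorem pvCnt_bound (N : Nat) : ∀ m, m < 2^N → pvCnt m ≤ N ∧ (pvCnt m = N ↔ m = 2^N - 1) := by
  induction N with
  | zero => intro m hm; interval_cases m; simp [pvCnt]
  | succ N IH =>
    intro m hm
    by_cases h0 : m = 0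
    · subst h0
      have : pvCnt 0 = 0 := by simp [pvCnt]
      have hp : 0 < 2^(N+1) := Nat.pow_pos (by norm_num)
      constructor
      · omega
      · constructor
        · intro h; omega
        · intro h; exfalso
          have h2 : 1 < 2^(N+1) := Nat.one_lt_two_pow_iff.2 (by omega)
          omega
    · have hrec : pvCnt m = m % 2 + pvCnt (m / 2) := by
        have := PySem.Int.bitCount_natCast (m := m) (by omega)
        simpa [pvCnt] using this
      have hdiv : m / 2 < 2^N := by
        rw [pow_succ] at hm; omega
      obtain ⟨hle, hiff⟩ := IH (m / 2) hdiv
      constructor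
      · omega
      · rw [hrec]
        constructor
        · intro h
          have h2 : m % 2 = 1 ∧ pvCnt (m/2) = N := by omega
          have := hiff.1 h2.2
          rw [pow_succ]; omega
        · intro h
          have hm2 : m % 2 = 1 := by rw [pow_succ] at *; omega
          have hd : m / 2 = 2^N - 1 := by
            rw [pow_succ] at h
            have hp : 0 < 2^N := Nat.pow_pos (by norm_num)
            omega
          rw [hiff.2 hd]; omega
-- ===== cast/normalization helpers =====
theorem pvShl_one (k : Nat) : pvShl 1 k = ((2^k : Nat) : Int) := by
  unfold pvShl; rw [Int.shiftLeft_eq]; push_cast; ring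

theorem pvShr_natCast (m k : Nat) : pvShr (m : Int) k = ((m >>> k : Nat) : Int) := by
  unfold pvShr; simp [Int.shiftRight_eq_div_pow, Nat.shiftRight_eq_div_pow]

theorem pvGetD_map_cast (l : List Nat) (k : Nat) :
    (l.map (fun (a : Nat) => (a : Int))).getD k 0 = ((l.getD k 0 : Nat) : Int) := by
  induction l generalizing k with
  | nil => simp
  | cons x t ih =>
    cases k with
    | zero => simp
    | succ k => simpa using ih k

theorem pvAnd_two_pow_ne (m i : Nat) : (m &&& 2^i ≠ 0) ↔ m.testBit i = true := by
  have he : m &&& 2^i = if m.testBit i then 2^i else 0 := by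
    apply Nat.eq_of_testBit_eq; intro j
    simp only [Nat.testBit_and, Nat.testBit_two_pow]
    by_cases hj : i = j
    · subst hj; by_cases hb : m.testBit i <;> simp [hb]
    · by_cases hb : m.testBit i <;> simp [hb, hj]
  rw [he]
  have h2 : (2:Nat)^i ≠ 0 := (Nat.pow_pos (by norm_num)).ne'
  by_cases hb : m.testBit i
  · simp [hb, h2]
  · simp [hb]

theorem pvShrAndOne (x i : Nat) : ((x >>> i) &&& 1 ≠ 0) ↔ x.testBit i = true := by
  simp [Nat.testBit, Nat.and_one_is_mod, Nat.shiftRight_eq_div_pow]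

theorem pvFoldl_length {α β : Type} (g : List α → β → List α)
    (h : ∀ c x, (g c x).length = c.length) :
    ∀ (l : List β) (c : List α), (l.foldl g c).length = c.length := by
  intro l
  induction l with
  | nil => intro c; rfl
  | cons x t ih => intro c; rw [List.foldl_cons, ih, h]

-- ===== A's init table =====
def pvInitSpec (adjN : List Nat) (K j : Nat) : Int :=
  if j ≠ 0 ∧ j &&& (j-1) = 0 ∧ j.log2 < K then ((adjN.getD j.log2 0 : Nat) : Int) else 0

theorem pvInitA_aux (adjN : List Nat) (N : Nat) (K : Nat) (hK : K ≤ N) :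
    ∀ j, j < 2^N →
      ((List.range K).foldl (fun c i => c.set (2^i) ((adjN.getD i 0 : Nat) : Int))
        (List.replicate (2^N) (0:Int))).getD j 0 = pvInitSpec adjN K j := by
  induction K with
  | zero =>
    intro j hj; simp [pvInitSpec, hj, List.getD_replicate]
  | succ K IH =>
    have ihget := IH (by omega)
    have ihlen : ((List.range K).foldl (fun c i => c.set (2^i) ((adjN.getD i 0 : Nat) : Int))
        (List.replicate (2^N) (0:Int))).length = 2^N := by
      rw [pvFoldl_length _ (fun c x => List.length_set), List.length_replicate]
    intro j hj
    rw [List.range_succ, List.foldl_append, List.foldl_cons, List.foldl_nil]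
    rw [pvGetD_set, ihlen]
    have hKlt : 2^K < 2^N := Nat.pow_lt_pow_right (by norm_num) (by omega)
    by_cases hjK : j = 2^K
    · subst hjK
      have h0 : (2:Nat)^K ≠ 0 := (Nat.pow_pos (by norm_num)).ne'
      simp [hKlt, pvInitSpec, Nat.log2_two_pow, h0, pvAnd_pred_two_pow]
    · rw [if_neg (by tauto), ihget j hj]
      unfold pvInitSpec
      split_ifs with h1 h2
      · rfl
      · exact absurd ⟨h1.1, h1.2.1, by omega⟩ h2
      · exfalso
        rename_i h2'
        have hj2 : j = 2 ^ j.log2 := pvPow2_of_and_pred j h2'.1 h2'.2.1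
        have hlK : j.log2 ≠ K := fun he => hjK (by rw [hj2, he])
        exact h1 ⟨h2'.1, h2'.2.1, by omega⟩
      · rfl

theorem pvBne_zero (x : Int) : (x != 0) = decide (x ≠ 0) := by
  by_cases h : x = 0 <;> simp [h]

theorem pvBandCast_zero (k : Nat) : PySem.Int.band 0 ((k : Nat) : Int) = 0 := by
  simpa using PySem.Int.band_natCast 0 k

theorem pvDPInnerA' (adjN : List Nat) (N : Nat) (hlen : adjN.length = N)
    (m : Nat) (hm : m < 2^N) (c : List Int) (hclen : c.length = 2^N)
    (hlow : ∀ j, j < 2^N → j ≠ m → c.getD j 0 = if j < m then pvCovSpec adjN j else pvInitSpec adjN N j)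
    (hc : c.getD m 0 = pvInitSpec adjN N m)
    (F : List Int → Nat → List Int)
    (hF : F = fun (c : List Int) (i : Nat) =>
        if (decide (((m &&& 2^i : Nat) : Int) ≠ 0) &&
            decide (PySem.Int.band (c.getD (m ^^^ 2^i) 0) ((2^i : Nat) : Int) ≠ 0))
        then c.set m (PySem.Int.bor (c.getD (m ^^^ 2^i) 0) ((adjN.getD i 0 : Nat) : Int))
        else c) :
    (∀ j, j ≠ m → ((List.range N).foldl F c).getD j 0 = c.getD j 0) ∧
    ((List.range N).foldl F c).getD m 0 = pvCovSpec adjN m := by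
  have hFlen : ∀ c x, (F c x).length = c.length := by
    intro c x; rw [hF]; dsimp only; split_ifs <;> simp
  have hFapp : ∀ (r : List Int) (i : Nat), F r i =
      if (decide (((m &&& 2^i : Nat) : Int) ≠ 0) &&
          decide (PySem.Int.band (r.getD (m ^^^ 2^i) 0) ((2^i : Nat) : Int) ≠ 0))
      then r.set m (PySem.Int.bor (r.getD (m ^^^ 2^i) 0) ((adjN.getD i 0 : Nat) : Int))
      else r := by
    intro r i; rw [hF]
  have key : ∀ K, K ≤ N →
      (∀ j, j ≠ m → ((List.range K).foldl F c).getD j 0 = c.getD j 0) ∧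
      (((List.range K).foldl F c).getD m 0 =
        if ∃ i, i < K ∧ m.testBit i = true ∧ pvGood adjN (m ^^^ 2^i) = true ∧
            (pvU adjN (m ^^^ 2^i)).testBit i = true
        then ((pvU adjN m : Nat) : Int) else pvInitSpec adjN N m) := by
    intro K
    induction K with
    | zero =>
      intro _
      refine ⟨fun j _ => rfl, ?_⟩
      rw [if_neg (by rintro ⟨i, hi, _⟩; omega)]
      exact hc
    | succ K IH =>
      intro hK1
      obtain ⟨ih1, ih2⟩ := IH (by omega)
      have hrlen : ((List.range K).foldl F c).length = 2^N := by
        rw [pvFoldl_length F hFlen, hclen]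
      rw [List.range_succ, List.foldl_append, List.foldl_cons, List.foldl_nil]
      by_cases hb : m.testBit K
      · -- bit K is set in m
        have hxlt : m ^^^ 2^K < m := pvXor_pow_lt _ _ hb
        have hxN : m ^^^ 2^K < 2^N := lt_trans hxlt hm
        have hread : ((List.range K).foldl F c).getD (m ^^^ 2^K) 0 = pvCovSpec adjN (m ^^^ 2^K) := by
          rw [ih1 _ (by omega), hlow _ hxN (by omega), if_pos hxlt]
        have hfst : decide (((m &&& 2^K : Nat) : Int) ≠ 0) = true := by
          simp only [decide_eq_true_eq, ne_eq, Int.natCast_eq_zero]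
          exact (pvAnd_two_pow_ne m K).2 hb
        by_cases hg : pvGood adjN (m ^^^ 2^K) = true ∧ (pvU adjN (m ^^^ 2^K)).testBit K = true
        · -- write happens
          have hcov : pvCovSpec adjN (m ^^^ 2^K) = ((pvU adjN (m ^^^ 2^K) : Nat) : Int) := by
            rw [pvCovSpec, if_pos hg.1]
          have hsnd : decide (PySem.Int.band (pvCovSpec adjN (m ^^^ 2^K))
              ((2^K : Nat) : Int) ≠ 0) = true := by
            rw [hcov, PySem.Int.band_natCast]
            simp only [decide_eq_true_eq, ne_eq, Int.natCast_eq_zero]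
            exact (pvAnd_two_pow_ne _ _).2 hg.2
          have hval : PySem.Int.bor (pvCovSpec adjN (m ^^^ 2^K)) ((adjN.getD K 0 : Nat) : Int)
              = ((pvU adjN m : Nat) : Int) := by
            rw [hcov, PySem.Int.bor_natCast, pvU_insert adjN m K (by omega) hb]
          have hstep : F ((List.range K).foldl F c) K =
              ((List.range K).foldl F c).set m (((pvU adjN m : Nat) : Int)) := by
            rw [hFapp, hread, hfst, hsnd, hval]
            simp only [Bool.and_self, if_true]
          rw [hstep]
          constructor
          · intro j hj
            rw [pvGetD_set, if_neg (by tauto)]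
            exact ih1 j hj
          · rw [pvGetD_set, if_pos ⟨rfl, by omega⟩,
              if_pos ⟨K, by omega, hb, hg.1, hg.2⟩]
        · -- second operand fails: no write
          have hsndF : decide (PySem.Int.band (pvCovSpec adjN (m ^^^ 2^K))
              ((2^K : Nat) : Int) ≠ 0) = false := by
            simp only [decide_eq_false_iff_not, ne_eq, not_not]
            cases hgg : pvGood adjN (m ^^^ 2^K) with
            | false =>
              rw [pvCovSpec, if_neg (by simp [hgg])]
              exact pvBandCast_zero _
            | true =>
              rw [pvCovSpec, if_pos hgg, PySem.Int.band_natCast]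
              simp only [Int.natCast_eq_zero]
              by_contra h0
              exact hg ⟨hgg, (pvAnd_two_pow_ne _ _).1 h0⟩
          have hstep : F ((List.range K).foldl F c) K = (List.range K).foldl F c := by
            rw [hFapp, hread, hsndF]
            simp only [Bool.and_false, Bool.false_eq_true, if_false]
          rw [hstep]
          have hPK : ¬ (m.testBit K = true ∧ pvGood adjN (m ^^^ 2^K) = true ∧
              (pvU adjN (m ^^^ 2^K)).testBit K = true) := fun hh => hg ⟨hh.2.1, hh.2.2⟩
          have hiff : (∃ i, i < K + 1 ∧ m.testBit i = true ∧ pvGood adjN (m ^^^ 2^i) = true ∧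
              (pvU adjN (m ^^^ 2^i)).testBit i = true) ↔
              (∃ i, i < K ∧ m.testBit i = true ∧ pvGood adjN (m ^^^ 2^i) = true ∧
              (pvU adjN (m ^^^ 2^i)).testBit i = true) := by
            constructor
            · rintro ⟨i, hi, hp⟩
              by_cases hiK : i = K
              · subst hiK; exact absurd hp hPK
              · exact ⟨i, by omega, hp⟩
            · rintro ⟨i, hi, hp⟩; exact ⟨i, by omega, hp⟩
          refine ⟨ih1, ?_⟩
          rw [ih2]
          exact (if_congr hiff.symm rfl rfl)
      · -- bit K not set: no write
        have hfstF : decide (((m &&& 2^K : Nat) : Int) ≠ 0) = false := by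
          simp only [decide_eq_false_iff_not, ne_eq, Int.natCast_eq_zero, not_not]
          by_contra h0
          exact hb ((pvAnd_two_pow_ne m K).1 h0)
        have hstep : F ((List.range K).foldl F c) K = (List.range K).foldl F c := by
          rw [hFapp, hfstF]
          simp only [Bool.false_and, Bool.false_eq_true, if_false]
        rw [hstep]
        have hiff : (∃ i, i < K + 1 ∧ m.testBit i = true ∧ pvGood adjN (m ^^^ 2^i) = true ∧
            (pvU adjN (m ^^^ 2^i)).testBit i = true) ↔
            (∃ i, i < K ∧ m.testBit i = true ∧ pvGood adjN (m ^^^ 2^i) = true ∧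
            (pvU adjN (m ^^^ 2^i)).testBit i = true) := by
          constructor
          · rintro ⟨i, hi, hp⟩
            by_cases hiK : i = K
            · subst hiK; exact absurd hp.1 (by simp [hb])
            · exact ⟨i, by omega, hp⟩
          · rintro ⟨i, hi, hp⟩; exact ⟨i, by omega, hp⟩
        refine ⟨ih1, ?_⟩
        rw [ih2]
        exact (if_congr hiff.symm rfl rfl)
  obtain ⟨k1, k2⟩ := key N le_rfl
  refine ⟨k1, ?_⟩
  rw [k2]
  by_cases h0 : m = 0
  · subst h0
    rw [if_neg (by rintro ⟨i, _, hbit, _⟩; simp at hbit)]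
    simp [pvInitSpec, pvCovSpec, pvGood_zero]
  by_cases hp : m &&& (m-1) = 0
  · -- m is a power of two
    have hm2 : m = 2 ^ m.log2 := pvPow2_of_and_pred m h0 hp
    have hlt : m.log2 < N := by
      by_contra hh
      have : 2^N ≤ 2^m.log2 := Nat.pow_le_pow_right (by norm_num) (by omega)
      omega
    have hex : ¬ ∃ i, i < N ∧ m.testBit i = true ∧ pvGood adjN (m ^^^ 2^i) = true ∧
        (pvU adjN (m ^^^ 2^i)).testBit i = true := by
      rintro ⟨i, hi, hbit, hgood, _⟩
      by_cases hil : i = m.log2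
      · subst hil
        have hz : m ^^^ 2^m.log2 = 0 := by nth_rewrite 1 [hm2]; exact Nat.xor_self _
        rw [hz] at hgood
        exact absurd hgood (by simp [pvGood_zero])
      · rw [hm2, Nat.testBit_two_pow] at hbit
        simp at hbit
        exact hil (by omega)
    rw [if_neg hex]
    have hgood : pvGood adjN m = true := by
      rw [pvGood_unfold, if_neg h0, if_pos hp]
    rw [pvInitSpec, if_pos ⟨h0, hp, hlt⟩, pvCovSpec, if_pos hgood]
    have : pvU adjN m = adjN.getD m.log2 0 := by
      nth_rewrite 1 [hm2]; exact pvU_two_pow adjN m.log2 (by omega)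
    rw [this]
  · -- at least two bits
    have hgu := pvGood_unfold adjN m
    rw [if_neg h0, if_neg hp, hlen] at hgu
    by_cases hgood : pvGood adjN m = true
    · rw [hgood] at hgu
      have hex : ∃ i, i < N ∧ m.testBit i = true ∧ pvGood adjN (m ^^^ 2^i) = true ∧
          (pvU adjN (m ^^^ 2^i)).testBit i = true := by
        obtain ⟨i, hi, hpi⟩ := List.any_eq_true.1 hgu.symm
        simp only [Bool.and_eq_true] at hpi
        exact ⟨i, List.mem_range.1 hi, hpi.1.1, hpi.1.2, hpi.2⟩
      rw [if_pos hex, pvCovSpec, if_pos hgood]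
    · have hgF : pvGood adjN m = false := by simpa using hgood
      rw [hgF] at hgu
      have hex : ¬ ∃ i, i < N ∧ m.testBit i = true ∧ pvGood adjN (m ^^^ 2^i) = true ∧
          (pvU adjN (m ^^^ 2^i)).testBit i = true := by
        rintro ⟨i, hi, h1, h2, h3⟩
        have : (List.range N).any (fun i => m.testBit i && pvGood adjN (m ^^^ 2^i) &&
            (pvU adjN (m ^^^ 2^i)).testBit i) = true :=
          List.any_eq_true.2 ⟨i, List.mem_range.2 hi, by simp [h1, h2, h3]⟩
        rw [← hgu] at this; simp at this
      rw [if_neg hex, pvCovSpec, if_neg (by simp [hgF]), pvInitSpec, if_neg (by tauto)]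
theorem pvCastSub1 (x : Nat) : ((x:Int) - 1).toNat = x - 1 := by omega

theorem pvOneAdd (k : Nat) : (1:Int) + (k:Int) = ((k+1 : Nat) : Int) := by push_cast; ring

theorem pvCastPred (k : Nat) : ((k+1 : Nat) : Int) - 1 = (k : Int) := by push_cast; ring

-- normalized inner body of A's DP, one mask m
def pvFA (adjN : List Nat) (N : Nat) : List Int → Nat → List Int := fun c m =>
  (List.range N).foldl (fun c i =>
      if (decide (((m &&& 2^i : Nat) : Int) ≠ 0) &&
          decide (PySem.Int.band (c.getD (m ^^^ 2^i) 0) ((2^i : Nat) : Int) ≠ 0))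
      then c.set m (PySem.Int.bor (c.getD (m ^^^ 2^i) 0) ((adjN.getD i 0 : Nat) : Int))
      else c) c

theorem pvFA_length (adjN : List Nat) (N : Nat) (c : List Int) (m : Nat) :
    (pvFA adjN N c m).length = c.length := by
  unfold pvFA
  rw [pvFoldl_length]
  intro c x; dsimp only; split_ifs <;> simp

theorem pvCovTableA (adjN : List Nat) (N : Nat) (hlen : adjN.length = N) :
    ∀ j, j < 2^N →
      ((List.range (2^N)).foldl (pvFA adjN N)
        ((List.range N).foldl (fun c i => c.set (2^i) ((adjN.getD i 0 : Nat) : Int))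
          (List.replicate (2^N) (0:Int)))).getD j 0 = pvCovSpec adjN j := by
  have hinitlen : ((List.range N).foldl (fun c i => c.set (2^i) ((adjN.getD i 0 : Nat) : Int))
      (List.replicate (2^N) (0:Int))).length = 2^N := by
    rw [pvFoldl_length _ (fun c x => List.length_set), List.length_replicate]
  have key : ∀ K, K ≤ 2^N → ∀ j, j < 2^N →
      (((List.range K).foldl (pvFA adjN N)
        ((List.range N).foldl (fun c i => c.set (2^i) ((adjN.getD i 0 : Nat) : Int))
          (List.replicate (2^N) (0:Int)))).getD j 0 =
        if j < K then pvCovSpec adjN j else pvInitSpec adjN N j) := by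
    intro K
    induction K with
    | zero =>
      intro _ j hj
      simpa using pvInitA_aux adjN N N le_rfl j hj
    | succ K IH =>
      intro hK j hj
      have ih := IH (by omega)
      set r := (List.range K).foldl (pvFA adjN N)
        ((List.range N).foldl (fun c i => c.set (2^i) ((adjN.getD i 0 : Nat) : Int))
          (List.replicate (2^N) (0:Int))) with hr
      have hrlen : r.length = 2^N := by
        rw [hr, pvFoldl_length _ (pvFA_length adjN N), hinitlen]
      rw [List.range_succ, List.foldl_append, List.foldl_cons, List.foldl_nil]
      have hlow : ∀ j, j < 2^N → j ≠ K → r.getD j 0 =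
          if j < K then pvCovSpec adjN j else pvInitSpec adjN N j := fun j hj _ => ih j hj
      have hcK : r.getD K 0 = pvInitSpec adjN N K := by
        rw [ih K (by omega), if_neg (by omega)]
      obtain ⟨h1, h2⟩ := pvDPInnerA' adjN N hlen K (by omega) r hrlen hlow hcK _ rfl
      by_cases hjK : j = K
      · rw [hjK, if_pos (Nat.lt_succ_self K)]
        exact h2
      · refine Eq.trans ((h1 j hjK).trans (ih j hj)) ?_
        by_cases hlt : j < K
        · rw [if_pos hlt, if_pos (by omega)]
        · rw [if_neg hlt, if_neg (by omega)]
  intro j hj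
  rw [key (2^N) le_rfl j hj, if_pos hj]

-- normalized B cov body
def pvFB (adjN : List Nat) : List Int → Nat → List Int := fun c k =>
  c.set (k+1) (PySem.Int.bor
    (c.getD ((k+1) ^^^ 2^((((PySem.Int.bitLength ((k+1 : Nat) : Int) : Int)) - 1).toNat)) 0)
    (PySem.List.pyGetD (adjN.map (fun (a : Nat) => (a : Int)))
      ((PySem.Int.bitLength ((k+1 : Nat) : Int) : Int) - 1) 0))

theorem pvCovTableB (adjN : List Nat) (N : Nat) (hlen : adjN.length = N) :
    ∀ j, j < 2^N →
      ((List.range (2^N - 1)).foldl (pvFB adjN) (List.replicate (2^N) (0:Int))).getD j 0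
        = ((pvU adjN j : Nat) : Int) := by
  have key : ∀ K, K ≤ 2^N - 1 → ∀ j, j < 2^N →
      ((List.range K).foldl (pvFB adjN) (List.replicate (2^N) (0:Int))).getD j 0
        = if j ≤ K then ((pvU adjN j : Nat) : Int) else 0 := by
    intro K
    induction K with
    | zero =>
      intro _ j hj
      rw [List.range_zero, List.foldl_nil, List.getD_replicate _ hj]
      by_cases hj0 : j ≤ 0
      · rw [if_pos hj0]
        have hz : j = 0 := by omega
        subst hz; rw [pvU_zero]; rfl
      · rw [if_neg hj0]
    | succ K IH =>
      intro hK j hj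
      have ih := IH (by omega)
      set r := (List.range K).foldl (pvFB adjN) (List.replicate (2^N) (0:Int)) with hr
      have hrlen : r.length = 2^N := by
        rw [hr, pvFoldl_length _ (fun c x => by unfold pvFB; simp), List.length_replicate]
      rw [List.range_succ, List.foldl_append, List.foldl_cons, List.foldl_nil]
      have hmN : K + 1 < 2^N := by
        have h1 : (1:Nat) ≤ 2^N := Nat.one_le_two_pow
        omega
      have hne : ((K+1 : Nat) : Int) ≠ 0 := by exact_mod_cast (by omega : (K+1 : Nat) ≠ 0)
      have hlt2 : K + 1 < 2 ^ PySem.Int.bitLength ((K+1 : Nat) : Int) := by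
        have := PySem.Int.lt_two_pow_bitLength ((K+1 : Nat) : Int)
        rwa [Int.natAbs_natCast] at this
      have hge : 2 ^ (PySem.Int.bitLength ((K+1 : Nat) : Int) - 1) ≤ K + 1 := by
        have := PySem.Int.two_pow_bitLength_le ((K+1 : Nat) : Int) hne
        rwa [Int.natAbs_natCast] at this
      set L := PySem.Int.bitLength ((K+1 : Nat) : Int) with hL
      have hL1 : 1 ≤ L := by
        by_contra hh
        have hz : L = 0 := by omega
        rw [hz] at hlt2; simp at hlt2
      have htb : (K+1).testBit (L-1) = true := by
        apply pvTestBit_between _ _ hge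
        have hz : L - 1 + 1 = L := by omega
        rw [hz]; exact hlt2
      have htN : L - 1 < N := by
        by_contra hh
        have : 2^N ≤ 2^(L-1) := Nat.pow_le_pow_right (by norm_num) (by omega)
        omega
      have hxlt : (K+1) ^^^ 2^(L-1) < K+1 := pvXor_pow_lt _ _ htb
      have hcastN : (L : Int) - 1 = ((L - 1 : Nat) : Int) := by omega
      have hstep : pvFB adjN r K = r.set (K+1) (PySem.Int.bor
          (r.getD ((K+1) ^^^ 2^(L-1)) 0) ((adjN.getD (L-1) 0 : Nat) : Int)) := by
        unfold pvFB
        rw [← hL, hcastN, Int.toNat_natCast, PySem.List.pyGetD_natCast, pvGetD_map_cast]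
      rw [hstep, pvGetD_set]
      by_cases hjm : j = K+1
      · subst hjm
        rw [if_pos ⟨rfl, by omega⟩]
        rw [ih ((K+1) ^^^ 2^(L-1)) (by omega), if_pos (by omega)]
        rw [PySem.Int.bor_natCast, pvU_insert adjN (K+1) (L-1) (by omega) htb]
        rw [if_pos le_rfl]
      · rw [if_neg (by tauto), ih j hj]
        by_cases hle : j ≤ K
        · rw [if_pos hle, if_pos (by omega)]
        · rw [if_neg hle, if_neg (by omega)]
  intro j hj
  rw [key (2^N - 1) le_rfl j hj, if_pos (by omega)]
-- normalized B good body
def pvFG (adjN : List Nat) (N : Nat) (cov : List Int) : List Bool → Nat → List Bool := fun g k =>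
  if ((((k+1) &&& k : Nat) : Int) == 0) then g.set (k+1) true
  else g.set (k+1) ((List.range N).any (fun i =>
      decide ((((k+1) &&& 2^i : Nat) : Int) ≠ 0) &&
      g.getD ((k+1) ^^^ 2^i) false &&
      decide (PySem.Int.band (pvShr (cov.getD ((k+1) ^^^ 2^i) 0) i) 1 ≠ 0)))

theorem pvGoodTable (adjN : List Nat) (N : Nat) (hlen : adjN.length = N) (cov : List Int)
    (hcov : ∀ j, j < 2^N → cov.getD j 0 = ((pvU adjN j : Nat) : Int)) :
    ∀ j, j < 2^N →
      ((List.range (2^N - 1)).foldl (pvFG adjN N cov) (List.replicate (2^N) false)).getD j false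
        = pvGood adjN j := by
  have key : ∀ K, K ≤ 2^N - 1 → ∀ j, j < 2^N →
      ((List.range K).foldl (pvFG adjN N cov) (List.replicate (2^N) false)).getD j false
        = if j ≤ K then pvGood adjN j else false := by
    intro K
    induction K with
    | zero =>
      intro _ j hj
      rw [List.range_zero, List.foldl_nil, List.getD_replicate _ hj]
      by_cases hj0 : j ≤ 0
      · rw [if_pos hj0]
        have hz : j = 0 := by omega
        subst hz; rw [pvGood_zero]
      · rw [if_neg hj0]
    | succ K IH =>
      intro hK j hj
      have ih := IH (by omega)
      set r := (List.range K).foldl (pvFG adjN N cov) (List.replicate (2^N) false) with hr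
      have hrlen : r.length = 2^N := by
        rw [hr, pvFoldl_length _ (fun c x => by unfold pvFG; split_ifs <;> simp),
          List.length_replicate]
      rw [List.range_succ, List.foldl_append, List.foldl_cons, List.foldl_nil]
      have hmN : K + 1 < 2^N := by
        have h1 : (1:Nat) ≤ 2^N := Nat.one_le_two_pow
        omega
      have hgu := pvGood_unfold adjN (K+1)
      rw [if_neg (Nat.succ_ne_zero K), Nat.add_sub_cancel, hlen] at hgu
      by_cases hp : (K+1) &&& K = 0
      · have hcond : ((((K+1) &&& K : Nat) : Int) == 0) = true := by simp [hp]
        have hstep : pvFG adjN N cov r K = r.set (K+1) true := by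
          unfold pvFG; rw [hcond]; simp
        rw [hstep, pvGetD_set_bool]
        have hgood : pvGood adjN (K+1) = true := by rw [hgu, if_pos hp]
        by_cases hjm : j = K+1
        · rw [hjm, if_pos ⟨rfl, by omega⟩, if_pos (by omega)]
          exact hgood.symm
        · rw [if_neg (by tauto), ih j hj]
          by_cases hle : j ≤ K
          · rw [if_pos hle, if_pos (by omega)]
          · rw [if_neg hle, if_neg (by omega)]
      · have hcond : ((((K+1) &&& K : Nat) : Int) == 0) = false := by simp [hp]
        have hany : ((List.range N).any (fun i =>
            decide ((((K+1) &&& 2^i : Nat) : Int) ≠ 0) &&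
            r.getD ((K+1) ^^^ 2^i) false &&
            decide (PySem.Int.band (pvShr (cov.getD ((K+1) ^^^ 2^i) 0) i) 1 ≠ 0)))
            = pvGood adjN (K+1) := by
          rw [hgu, if_neg hp]
          apply pvAny_congr_mem
          intro i hi
          have hiN : i < N := List.mem_range.1 hi
          by_cases hbit : (K+1).testBit i
          · have hxlt : (K+1) ^^^ 2^i < K+1 := pvXor_pow_lt _ _ hbit
            have hxN : (K+1) ^^^ 2^i < 2^N := by omega
            have e1 : decide ((((K+1) &&& 2^i : Nat) : Int) ≠ 0) = true := by
              simp only [decide_eq_true_eq, ne_eq, Int.natCast_eq_zero]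
              exact (pvAnd_two_pow_ne _ _).2 hbit
            have e2 : r.getD ((K+1) ^^^ 2^i) false = pvGood adjN ((K+1) ^^^ 2^i) := by
              rw [ih _ hxN, if_pos (by omega)]
            have e3 : decide (PySem.Int.band (pvShr (cov.getD ((K+1) ^^^ 2^i) 0) i) 1 ≠ 0)
                = (pvU adjN ((K+1) ^^^ 2^i)).testBit i := by
              have hcast : decide ((((pvU adjN ((K+1) ^^^ 2^i) >>> i) &&& 1 : Nat) : Int) ≠ 0)
                  = decide ((pvU adjN ((K+1) ^^^ 2^i)).testBit i = true) := by
                rw [decide_eq_decide]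
                simp only [ne_eq, Int.natCast_eq_zero]
                exact ⟨fun h => (pvShrAndOne _ _).1 h, fun h => (pvShrAndOne _ _).2 h⟩
              rw [hcov _ hxN, pvShr_natCast, show (1:Int) = ((1:Nat) : Int) from rfl,
                PySem.Int.band_natCast, hcast]
              by_cases ht : (pvU adjN ((K+1) ^^^ 2^i)).testBit i <;> simp [ht]
            rw [e1, e2, e3, hbit]
          · have e1 : decide ((((K+1) &&& 2^i : Nat) : Int) ≠ 0) = false := by
              simp only [decide_eq_false_iff_not, ne_eq, Int.natCast_eq_zero, not_not]
              by_contra hc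
              exact hbit ((pvAnd_two_pow_ne _ _).1 hc)
            have e1' : (K+1).testBit i = false := by simpa using hbit
            rw [e1, e1']
            simp
        have hstep : pvFG adjN N cov r K = r.set (K+1) (pvGood adjN (K+1)) := by
          unfold pvFG
          rw [hcond]
          simp only [Bool.false_eq_true, if_false]
          rw [hany]
        rw [hstep, pvGetD_set_bool]
        by_cases hjm : j = K+1
        · rw [hjm, if_pos ⟨rfl, by omega⟩, if_pos (by omega)]
        · rw [if_neg (by tauto), ih j hj]
          by_cases hle : j ≤ K
          · rw [if_pos hle, if_pos (by omega)]
          · rw [if_neg hle, if_neg (by omega)]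
  intro j hj
  rw [key (2^N - 1) le_rfl j hj, if_pos (by omega)]
-- ===== scan =====
def pvPN (adjN : List Nat) (N m : Nat) : Bool := pvGood adjN m && (pvU adjN m == 2^N - 1)

def pvStepA (adjN : List Nat) (N : Nat) : (Int × Int) → Nat → (Int × Int) := fun st m =>
  if pvPN adjN N m then
    (if ((pvCnt m : Nat) : Int) < st.1 then (((pvCnt m : Nat) : Int), ((m : Nat) : Int)) else st)
  else st

def pvG2 : Option Int → Int → Option Int := fun acc x =>
  match acc with
  | none => some x
  | some b => if (decide ((PySem.Int.bitCount x : Int) < (PySem.Int.bitCount b : Int)) ||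
      (!decide ((PySem.Int.bitCount b : Int) < (PySem.Int.bitCount x : Int)) && decide (x < b)))
      then some x else some b

def pvStepB (adjN : List Nat) (N : Nat) : Option Int → Nat → Option Int := fun o m =>
  if pvPN adjN N m then pvG2 o ((m : Nat) : Int) else o

theorem pvScan_some (adjN : List Nat) (N : Nat) :
    ∀ (ms : List Nat), ms.Pairwise (· < ·) → (∀ m ∈ ms, pvCnt m < N) →
    ∀ (b : Nat), pvCnt b < N → (∀ m ∈ ms, b < m) →
    ∃ b' : Nat, pvCnt b' < N ∧
      ms.foldl (pvStepB adjN N) (some ((b : Nat) : Int)) = some ((b' : Nat) : Int) ∧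
      ms.foldl (pvStepA adjN N) (((pvCnt b : Nat) : Int), ((b : Nat) : Int)) =
        (((pvCnt b' : Nat) : Int), ((b' : Nat) : Int)) := by
  intro ms
  induction ms with
  | nil => intro _ _ b hb _; exact ⟨b, hb, rfl, rfl⟩
  | cons m t ih =>
    intro hpw hcnt b hb hblt
    have hpw' := (List.pairwise_cons.1 hpw).2
    have hmlt := (List.pairwise_cons.1 hpw).1
    have hcnt' : ∀ x ∈ t, pvCnt x < N := fun x hx => hcnt x (by simp [hx])
    have hbm : b < m := hblt m (by simp)
    rw [List.foldl_cons, List.foldl_cons]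
    by_cases hP : pvPN adjN N m
    · by_cases hlt : pvCnt m < pvCnt b
      · have hA : pvStepA adjN N (((pvCnt b : Nat) : Int), ((b : Nat) : Int)) m
            = (((pvCnt m : Nat) : Int), ((m : Nat) : Int)) := by
          unfold pvStepA; rw [if_pos hP, if_pos (by show ((pvCnt m : Nat) : Int) < ((pvCnt b : Nat) : Int); exact_mod_cast hlt)]
        have hB : pvStepB adjN N (some ((b : Nat) : Int)) m = some ((m : Nat) : Int) := by
          unfold pvStepB pvG2; rw [if_pos hP]
          have : decide ((PySem.Int.bitCount ((m : Nat) : Int) : Int) <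
              (PySem.Int.bitCount ((b : Nat) : Int) : Int)) = true := by
            simp only [decide_eq_true_eq]
            exact_mod_cast hlt
          simp only [this, Bool.true_or, if_true]
        rw [hA, hB]
        exact ih hpw' hcnt' m (hcnt m (by simp)) hmlt
      · have hA : pvStepA adjN N (((pvCnt b : Nat) : Int), ((b : Nat) : Int)) m
            = (((pvCnt b : Nat) : Int), ((b : Nat) : Int)) := by
          unfold pvStepA; rw [if_pos hP, if_neg (by show ¬ ((pvCnt m : Nat) : Int) < ((pvCnt b : Nat) : Int); exact_mod_cast hlt)]
        have hB : pvStepB adjN N (some ((b : Nat) : Int)) m = some ((b : Nat) : Int) := by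
          unfold pvStepB pvG2; rw [if_pos hP]
          have e1 : decide ((PySem.Int.bitCount ((m : Nat) : Int) : Int) <
              (PySem.Int.bitCount ((b : Nat) : Int) : Int)) = false := by
            simp only [decide_eq_false_iff_not]
            exact_mod_cast hlt
          have e2 : decide (((m : Nat) : Int) < ((b : Nat) : Int)) = false := by
            simp only [decide_eq_false_iff_not]
            exact_mod_cast (by omega : ¬ m < b)
          simp only [e1, e2, Bool.false_or, Bool.and_false, if_false, Bool.false_eq_true]
        rw [hA, hB]
        exact ih hpw' hcnt' b hb (fun x hx => lt_trans hbm (hmlt x hx))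
    · have hA : pvStepA adjN N (((pvCnt b : Nat) : Int), ((b : Nat) : Int)) m
          = (((pvCnt b : Nat) : Int), ((b : Nat) : Int)) := by
        unfold pvStepA; rw [if_neg hP]
      have hB : pvStepB adjN N (some ((b : Nat) : Int)) m = some ((b : Nat) : Int) := by
        unfold pvStepB; rw [if_neg hP]
      rw [hA, hB]
      exact ih hpw' hcnt' b hb (fun x hx => lt_trans hbm (hmlt x hx))

theorem pvScan_none (adjN : List Nat) (N : Nat) :
    ∀ (ms : List Nat), ms.Pairwise (· < ·) → (∀ m ∈ ms, pvCnt m < N) →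
    (ms.foldl (pvStepB adjN N) none = none ∧
      ms.foldl (pvStepA adjN N) ((N : Int), ((2^N - 1 : Nat) : Int)) =
        ((N : Int), ((2^N - 1 : Nat) : Int))) ∨
    (∃ b' : Nat, pvCnt b' < N ∧
      ms.foldl (pvStepB adjN N) none = some ((b' : Nat) : Int) ∧
      ms.foldl (pvStepA adjN N) ((N : Int), ((2^N - 1 : Nat) : Int)) =
        (((pvCnt b' : Nat) : Int), ((b' : Nat) : Int))) := by
  intro ms
  induction ms with
  | nil => intro _ _; left; exact ⟨rfl, rfl⟩
  | cons m t ih =>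
    intro hpw hcnt
    have hpw' := (List.pairwise_cons.1 hpw).2
    have hmlt := (List.pairwise_cons.1 hpw).1
    have hcnt' : ∀ x ∈ t, pvCnt x < N := fun x hx => hcnt x (by simp [hx])
    rw [List.foldl_cons, List.foldl_cons]
    by_cases hP : pvPN adjN N m
    · have hA : pvStepA adjN N ((N : Int), ((2^N - 1 : Nat) : Int)) m
          = (((pvCnt m : Nat) : Int), ((m : Nat) : Int)) := by
        unfold pvStepA; rw [if_pos hP, if_pos (by show ((pvCnt m : Nat) : Int) < (N : Int); exact_mod_cast hcnt m (by simp))]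
      have hB : pvStepB adjN N none m = some ((m : Nat) : Int) := by
        unfold pvStepB pvG2; rw [if_pos hP]
      rw [hA, hB]
      right
      exact pvScan_some adjN N t hpw' hcnt' m (hcnt m (by simp)) hmlt
    · have hA : pvStepA adjN N ((N : Int), ((2^N - 1 : Nat) : Int)) m
          = ((N : Int), ((2^N - 1 : Nat) : Int)) := by
        unfold pvStepA; rw [if_neg hP]
      have hB : pvStepB adjN N none m = none := by
        unfold pvStepB; rw [if_neg hP]
      rw [hA, hB]
      exact ih hpw' hcnt'

theorem pvScanFull (adjN : List Nat) (N : Nat) (hN : 1 ≤ N) :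
    ((List.range (2^N)).foldl (pvStepB adjN N) none = none ∧
      (List.range (2^N)).foldl (pvStepA adjN N) ((N : Int), ((2^N - 1 : Nat) : Int)) =
        ((N : Int), ((2^N - 1 : Nat) : Int))) ∨
    (∃ b' : Nat, (List.range (2^N)).foldl (pvStepB adjN N) none = some ((b' : Nat) : Int) ∧
      (List.range (2^N)).foldl (pvStepA adjN N) ((N : Int), ((2^N - 1 : Nat) : Int)) =
        (((pvCnt b' : Nat) : Int), ((b' : Nat) : Int))) := by
  have h1 : (1:Nat) ≤ 2^N := Nat.one_le_two_pow
  have hsplit : List.range (2^N) = List.range (2^N - 1) ++ [2^N - 1] := by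
    have h2 : 2^N = (2^N - 1) + 1 := by omega
    conv_lhs => rw [h2]
    rw [List.range_succ]
  have hcf : pvCnt (2^N - 1) = N := (pvCnt_bound N (2^N - 1) (by omega)).2.mpr rfl
  have hcnt : ∀ m ∈ List.range (2^N - 1), pvCnt m < N := by
    intro m hm
    have hmlt : m < 2^N - 1 := List.mem_range.1 hm
    obtain ⟨hle, hiff⟩ := pvCnt_bound N m (by omega)
    have hne : pvCnt m ≠ N := fun he => by have := hiff.1 he; omega
    omega
  rw [hsplit, List.foldl_append, List.foldl_append]
  rcases pvScan_none adjN N (List.range (2^N - 1)) List.pairwise_lt_range hcnt with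
    ⟨hB, hA⟩ | ⟨b', hbN, hB, hA⟩
  · rw [hB, hA, List.foldl_cons, List.foldl_nil, List.foldl_cons, List.foldl_nil]
    by_cases hP : pvPN adjN N (2^N - 1)
    · right
      refine ⟨2^N - 1, ?_, ?_⟩
      · unfold pvStepB pvG2; rw [if_pos hP]
      · unfold pvStepA; rw [if_pos hP, if_neg (by rw [hcf]; omega), hcf]
    · left
      constructor
      · unfold pvStepB; rw [if_neg hP]
      · unfold pvStepA; rw [if_neg hP]
  · rw [hB, hA, List.foldl_cons, List.foldl_nil, List.foldl_cons, List.foldl_nil]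
    right
    refine ⟨b', ?_, ?_⟩
    · by_cases hP : pvPN adjN N (2^N - 1)
      · unfold pvStepB pvG2; rw [if_pos hP]
        have e1 : decide ((PySem.Int.bitCount ((2^N - 1 : Nat) : Int) : Int) <
            (PySem.Int.bitCount ((b' : Nat) : Int) : Int)) = false := by
          simp only [decide_eq_false_iff_not]
          exact_mod_cast (by rw [show PySem.Int.bitCount ((2^N - 1 : Nat) : Int) = N from hcf]; omega :
            ¬ (PySem.Int.bitCount ((2^N - 1 : Nat) : Int) < pvCnt b'))
        have e2 : (!decide ((PySem.Int.bitCount ((b' : Nat) : Int) : Int) <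
            (PySem.Int.bitCount ((2^N - 1 : Nat) : Int) : Int))) = false := by
          simp only [Bool.not_eq_false', decide_eq_true_eq]
          exact_mod_cast (by rw [show PySem.Int.bitCount ((2^N - 1 : Nat) : Int) = N from hcf]; exact hbN :
            pvCnt b' < PySem.Int.bitCount ((2^N - 1 : Nat) : Int))
        simp only [e1, e2, Bool.false_and, Bool.false_or, if_false, Bool.false_eq_true]
      · unfold pvStepB; rw [if_neg hP]
    · by_cases hP : pvPN adjN N (2^N - 1)
      · unfold pvStepA; rw [if_pos hP, if_neg (by rw [hcf]; push_cast; omega)]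
      · unfold pvStepA; rw [if_neg hP]
-- ===== normalization of the ports over a casted adjacency list =====
theorem pvFull_cast (N : Nat) : ((2^N : Nat) : Int) - 1 = ((2^N - 1 : Nat) : Int) := by
  have : (1:Nat) ≤ 2^N := Nat.one_le_two_pow
  omega

theorem pvCovA_norm (N : Nat) (adjN : List Nat) :
    pvCovA (N : Int) (adjN.map (fun (a : Nat) => (a : Int))) =
      (List.range (2^N)).foldl (pvFA adjN N)
        ((List.range N).foldl (fun c i => c.set (2^i) ((adjN.getD i 0 : Nat) : Int))
          (List.replicate (2^N) (0:Int))) := by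
  unfold pvCovA pvFA
  simp only [Int.toNat_natCast, pvShl_one, PySem.List.pyRange_zero_natCast, List.foldl_map,
    PySem.Int.band_natCast, PySem.Int.bxor_natCast, PySem.List.pyGetD_natCast,
    PySem.List.pySetD_natCast, pvGetD_map_cast, pvBne_zero]

theorem pvCovB_norm (N : Nat) (adjN : List Nat) :
    pvCovB (N : Int) (adjN.map (fun (a : Nat) => (a : Int))) =
      (List.range (2^N - 1)).foldl (pvFB adjN) (List.replicate (2^N) (0:Int)) := by
  unfold pvCovB pvFB
  simp only [Int.toNat_natCast, pvShl_one, PySem.List.pyRange_one, List.foldl_map,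
    pvCastSub1, pvOneAdd, PySem.Int.bxor_natCast, PySem.List.pyGetD_natCast,
    PySem.List.pySetD_natCast]

theorem pvGoodB_norm (N : Nat) (adjN : List Nat) (cov : List Int) :
    pvGoodB (N : Int) cov =
      (List.range (2^N - 1)).foldl (pvFG adjN N cov) (List.replicate (2^N) false) := by
  unfold pvGoodB pvFG
  simp only [Int.toNat_natCast, pvShl_one, PySem.List.pyRange_one, List.foldl_map,
    List.any_map, Function.comp_def, zero_add, sub_zero, pvCastSub1, pvOneAdd, pvCastPred,
    PySem.Int.band_natCast, PySem.Int.bxor_natCast, PySem.List.pyGetD_natCast,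
    PySem.List.pySetD_natCast, pvBne_zero]

theorem pvCastPow_sub_one (N : Nat) : ((2^N - 1 : Nat) : Int) = (2:Int)^N - 1 := by
  have h1 : (1:Nat) ≤ 2^N := Nat.one_le_two_pow
  push_cast [h1]
  ring

theorem pvCovSpec_beq (adjN : List Nat) (N m : Nat) (hN : 1 ≤ N) :
    (pvCovSpec adjN m == ((2^N - 1 : Nat) : Int)) = pvPN adjN N m := by
  unfold pvCovSpec pvPN
  cases hg : pvGood adjN m
  · have h0 : (0:Int) ≠ (2:Int)^N - 1 := by
      have h3 : (2:Nat) ≤ 2^N := by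
        calc (2:Nat) = 2^1 := by norm_num
        _ ≤ 2^N := Nat.pow_le_pow_right (by norm_num) hN
      have : (2:Int) ≤ (2:Int)^N := by exact_mod_cast h3
      omega
    simp [hg, pvCastPow_sub_one, h0]
  · by_cases he : pvU adjN m = 2^N - 1
    · simp [hg, he]
    · have h0 : ((pvU adjN m : Nat) : Int) ≠ (2:Int)^N - 1 := by
        rw [← pvCastPow_sub_one]
        exact fun hh => he (by exact_mod_cast hh)
      simp [hg, he, pvCastPow_sub_one, h0]

theorem pvScanA_norm (adjN : List Nat) (N : Nat) (hN : 1 ≤ N) (coverage : List Int)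
    (hcov : ∀ j, j < 2^N → coverage.getD j 0 = pvCovSpec adjN j) :
    pvScanA (N : Int) coverage =
      (List.range (2^N)).foldl (pvStepA adjN N) ((N : Int), ((2^N - 1 : Nat) : Int)) := by
  unfold pvScanA
  simp only [Int.toNat_natCast, pvShl_one, pvFull_cast, PySem.List.pyRange_zero_natCast,
    List.foldl_map, PySem.List.pyGetD_natCast]
  apply PySem.List.foldl_congr_mem
  intro st m hm
  have hmN : m < 2^N := List.mem_range.1 hm
  rw [hcov m hmN, pvCovSpec_beq adjN N m hN]
  unfold pvStepA
  by_cases hP : pvPN adjN N m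
  · rw [hP]; rfl
  · rw [show pvPN adjN N m = false by simpa using hP]; rfl

theorem pvBestB_norm (adjN : List Nat) (N : Nat) (hN : 1 ≤ N)
    (cov : List Int) (good : List Bool)
    (hcov : ∀ j, j < 2^N → cov.getD j 0 = ((pvU adjN j : Nat) : Int))
    (hgood : ∀ j, j < 2^N → good.getD j false = pvGood adjN j) :
    pvBestB (N : Int) cov good = (List.range (2^N)).foldl (pvStepB adjN N) none := by
  unfold pvBestB PySem.List.min2?
  simp only [Int.toNat_natCast, pvShl_one, pvFull_cast, PySem.List.pyRange_zero_natCast,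
    List.filter_map, List.foldl_map, List.foldl_filter, Function.comp,
    PySem.List.pyGetD_natCast]
  apply PySem.List.foldl_congr_mem
  intro acc m hm
  have hmN : m < 2^N := List.mem_range.1 hm
  rw [hgood m hmN, hcov m hmN]
  have hbeq : ((((pvU adjN m : Nat) : Int)) == ((2^N - 1 : Nat) : Int)) = (pvU adjN m == 2^N - 1) := by
    by_cases he : pvU adjN m = 2^N - 1
    · simp [he]
    · have h0 : ((pvU adjN m : Nat) : Int) ≠ (2:Int)^N - 1 := by
        rw [← pvCastPow_sub_one]
        exact fun hh => he (by exact_mod_cast hh)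
      simp [he, pvCastPow_sub_one, h0]
  rw [hbeq]
  unfold pvStepB pvPN pvG2
  by_cases hP : (pvGood adjN m && (pvU adjN m == 2^N - 1)) = true
  · rw [hP]
    simp only [if_true]
    cases acc <;> rfl
  · rw [show (pvGood adjN m && (pvU adjN m == 2^N - 1)) = false by simpa using hP]
    simp

theorem pvSol_full (N : Nat) :
    pvSolA (N : Int) ((2^N - 1 : Nat) : Int) = PySem.List.pyRange 1 ((N : Int) + 1) 1 := by
  unfold pvSolA
  rw [PySem.List.pyRange_zero_natCast, List.filter_map]
  have hfil : List.filter ((fun i => PySem.Int.band ((2^N - 1 : Nat) : Int) (pvShl 1 i.toNat) != 0) ∘ (fun k : Nat => (k : Int))) (List.range N) = List.range N := by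
    rw [List.filter_eq_self]
    intro k hk
    have hkN : k < N := List.mem_range.1 hk
    simp only [Function.comp_apply, Int.toNat_natCast, pvShl_one, PySem.Int.band_natCast, pvBne_zero]
    simp only [decide_eq_true_eq, ne_eq, Int.natCast_eq_zero]
    apply (pvAnd_two_pow_ne _ _).2
    rw [Nat.testBit_two_pow_sub_one]
    simpa using hkN
  rw [hfil, PySem.List.pyRange_one, List.map_map]
  have ht : ((N : Int) + 1 - 1).toNat = N := by simp
  rw [ht]
  apply List.map_congr_left
  intro k _
  simp only [Function.comp_apply]
  omega
-- ===== adjacency builder =====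
theorem pvAdj_edges_aux (n : Int) :
    ∀ (l : List (Int × Int)), (∀ p ∈ l, 1 ≤ p.1 ∧ p.1 ≤ n ∧ 1 ≤ p.2 ∧ p.2 ≤ n) →
    ∀ (cN : List Nat), cN.length = n.toNat →
    ∃ dN : List Nat,
      (l.foldl (fun a uv =>
        let u_idx : Int := uv.1 - 1
        let v_idx : Int := uv.2 - 1
        let a := PySem.List.pySetD a u_idx (PySem.Int.bor (PySem.List.pyGetD a u_idx 0) (pvShl 1 v_idx.toNat))
        PySem.List.pySetD a v_idx (PySem.Int.bor (PySem.List.pyGetD a v_idx 0) (pvShl 1 u_idx.toNat)))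
        (cN.map (fun (a : Nat) => (a : Int)))) = dN.map (fun (a : Nat) => (a : Int)) ∧ dN.length = n.toNat := by
  intro l
  induction l with
  | nil => intro _ cN hlen; exact ⟨cN, rfl, hlen⟩
  | cons p t ih =>
    intro hb cN hlen
    obtain ⟨h1, h2, h3, h4⟩ := hb p (by simp)
    rw [List.foldl_cons]
    have hu : p.1 - 1 = (((p.1 - 1).toNat : Nat) : Int) := (Int.toNat_of_nonneg (by omega)).symm
    have hv : p.2 - 1 = (((p.2 - 1).toNat : Nat) : Int) := (Int.toNat_of_nonneg (by omega)).symm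
    have hstep : (let u_idx : Int := p.1 - 1
        let v_idx : Int := p.2 - 1
        let a := PySem.List.pySetD (cN.map (fun (a : Nat) => (a : Int))) u_idx
          (PySem.Int.bor (PySem.List.pyGetD (cN.map (fun (a : Nat) => (a : Int))) u_idx 0) (pvShl 1 v_idx.toNat))
        PySem.List.pySetD a v_idx (PySem.Int.bor (PySem.List.pyGetD a v_idx 0) (pvShl 1 u_idx.toNat))) =
        ((cN.set (p.1 - 1).toNat (cN.getD (p.1 - 1).toNat 0 ||| 2^(p.2 - 1).toNat)).set (p.2 - 1).toNat
          ((cN.set (p.1 - 1).toNat (cN.getD (p.1 - 1).toNat 0 ||| 2^(p.2 - 1).toNat)).getD (p.2 - 1).toNat 0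
            ||| 2^(p.1 - 1).toNat)).map (fun (a : Nat) => (a : Int)) := by
      dsimp only
      rw [hu, hv]
      simp only [Int.toNat_natCast, PySem.List.pyGetD_natCast, PySem.List.pySetD_natCast,
        pvGetD_map_cast, pvShl_one, PySem.Int.bor_natCast, ← List.map_set]
    rw [hstep]
    exact ih (fun q hq => hb q (by simp [hq])) _ (by simp [hlen])

theorem pvAdj_diag_aux (n : Int) :
    ∀ (l : List Nat), ∀ (cN : List Nat), cN.length = n.toNat →
    ∃ dN : List Nat,
      (l.foldl (fun a (k : Nat) =>
          PySem.List.pySetD a (k : Int) (PySem.Int.bor (PySem.List.pyGetD a (k : Int) 0) (pvShl 1 k)))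
        (cN.map (fun (a : Nat) => (a : Int)))) = dN.map (fun (a : Nat) => (a : Int)) ∧ dN.length = n.toNat := by
  intro l
  induction l with
  | nil => intro cN hlen; exact ⟨cN, rfl, hlen⟩
  | cons k t ih =>
    intro cN hlen
    rw [List.foldl_cons]
    have hstep : PySem.List.pySetD (cN.map (fun (a : Nat) => (a : Int))) (k : Int)
        (PySem.Int.bor (PySem.List.pyGetD (cN.map (fun (a : Nat) => (a : Int))) (k : Int) 0) (pvShl 1 k)) =
        (cN.set k (cN.getD k 0 ||| 2^k)).map (fun (a : Nat) => (a : Int)) := by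
      rw [PySem.List.pyGetD_natCast, PySem.List.pySetD_natCast, pvGetD_map_cast, pvShl_one,
        PySem.Int.bor_natCast, ← List.map_set]
    rw [hstep]
    exact ih _ (by simp [hlen])

theorem pvAdjA_spec (n : Int) (edges : List (Int × Int)) (hn : 0 ≤ n)
    (he : ∀ p ∈ edges, 1 ≤ p.1 ∧ p.1 ≤ n ∧ 1 ≤ p.2 ∧ p.2 ≤ n) :
    ∃ adjN : List Nat, pvAdjA n edges = adjN.map (fun (a : Nat) => (a : Int)) ∧ adjN.length = n.toNat := by
  unfold pvAdjA
  have hrep : (List.replicate n.toNat (0:Int)) = (List.replicate n.toNat (0:Nat)).map (fun (a : Nat) => (a : Int)) := by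
    rw [List.map_replicate]; rfl
  rw [hrep]
  obtain ⟨dN, hd, hdlen⟩ := pvAdj_edges_aux n edges he (List.replicate n.toNat 0) (by simp)
  rw [hd]
  have hn' : n = ((n.toNat : Nat) : Int) := (Int.toNat_of_nonneg hn).symm
  rw [hn', PySem.List.pyRange_zero_natCast, List.foldl_map]
  have hbody : (fun (a : List Int) (k : Nat) =>
      PySem.List.pySetD a (k : Int) (PySem.Int.bor (PySem.List.pyGetD a (k : Int) 0) (pvShl 1 ((k : Int)).toNat))) =
      (fun (a : List Int) (k : Nat) =>
      PySem.List.pySetD a (k : Int) (PySem.Int.bor (PySem.List.pyGetD a (k : Int) 0) (pvShl 1 k))) := by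
    funext a k; rw [Int.toNat_natCast]
  rw [hbody]
  obtain ⟨eN, hE, hElen⟩ := pvAdj_diag_aux n (List.range n.toNat) dN hdlen
  exact ⟨eN, hE, by rw [Int.toNat_natCast]; exact hElen⟩

-- ===== main equality after the shared prefix =====
theorem pvMain (N : Nat) (hN : 1 ≤ N) (adjN : List Nat) (hlen : adjN.length = N) :
    (((pvScanA (N:Int) (pvCovA (N:Int) (adjN.map (fun (a : Nat) => (a : Int))))).1,
      pvSolA (N:Int) (pvScanA (N:Int) (pvCovA (N:Int) (adjN.map (fun (a : Nat) => (a : Int))))).2) : Int × List Int) =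
    (match pvBestB (N:Int) (pvCovB (N:Int) (adjN.map (fun (a : Nat) => (a : Int))))
        (pvGoodB (N:Int) (pvCovB (N:Int) (adjN.map (fun (a : Nat) => (a : Int))))) with
     | none => ((N:Int), PySem.List.pyRange 1 ((N:Int) + 1) 1)
     | some best => ((PySem.Int.bitCount best : Int), pvSolB (N:Int) best)) := by
  have hcovA : ∀ j, j < 2^N →
      (pvCovA (N:Int) (adjN.map (fun (a : Nat) => (a : Int)))).getD j 0 = pvCovSpec adjN j := by
    intro j hj; rw [pvCovA_norm]; exact pvCovTableA adjN N hlen j hj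
  have hcovB : ∀ j, j < 2^N →
      (pvCovB (N:Int) (adjN.map (fun (a : Nat) => (a : Int)))).getD j 0 = ((pvU adjN j : Nat) : Int) := by
    intro j hj; rw [pvCovB_norm]; exact pvCovTableB adjN N hlen j hj
  have hgoodB : ∀ j, j < 2^N →
      (pvGoodB (N:Int) (pvCovB (N:Int) (adjN.map (fun (a : Nat) => (a : Int))))).getD j false = pvGood adjN j := by
    intro j hj
    rw [pvGoodB_norm N adjN]
    exact pvGoodTable adjN N hlen _ hcovB j hj
  rw [pvScanA_norm adjN N hN _ hcovA, pvBestB_norm adjN N hN _ _ hcovB hgoodB]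
  rcases pvScanFull adjN N hN with ⟨hB, hA⟩ | ⟨b', hB, hA⟩
  · rw [hB, hA]
    show ((N:Int), pvSolA (N:Int) ((2^N - 1 : Nat) : Int)) = _
    rw [pvSol_full]
  · rw [hB, hA]
    rfl

-- ===== VERDICT (by name: the statement is the Claim_ definition above) =====
theorem calculate_optimal_solution_py_spec : Claim_equal_calculate_optimal_solution_py := by
  intro n edges _ hPre
  unfold Spec_calculate_optimal_solution_py
  unfold calculate_optimal_solution_py calculate_optimal_solution_py_alt
  by_cases h1 : n = 1
  · rw [if_pos h1, if_pos h1]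
  rw [if_neg h1, if_neg h1]
  have hn : 0 ≤ n := by
    rcases hPre with h | ⟨h, _⟩
    · omega
    · exact h
  have he : ∀ p ∈ edges, 1 ≤ p.1 ∧ p.1 ≤ n ∧ 1 ≤ p.2 ∧ p.2 ≤ n := by
    rcases hPre with h | ⟨_, h⟩
    · exact absurd h h1
    · exact h
  obtain ⟨adjN, hadj, hlenN⟩ := pvAdjA_spec n edges hn he
  rw [show pvAdjB = pvAdjA from rfl, hadj]
  have hnn : n = ((n.toNat : Nat) : Int) := (Int.toNat_of_nonneg hn).symm
  rw [hnn]
  by_cases hall : (adjN.map (fun (a : Nat) => (a : Int))).all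
      (fun m => m == pvShl 1 ((((n.toNat : Nat) : Int)).toNat) - 1) = true
  · rw [if_pos hall, if_pos hall]
  · rw [if_neg hall, if_neg hall]
    have hN1 : 1 ≤ n.toNat := by
      rcases Nat.eq_zero_or_pos n.toNat with h0 | h0
      · exfalso
        apply hall
        have : adjN = [] := List.length_eq_zero_iff.1 (by rw [hlenN, h0])
        rw [this]
        rfl
      · exact h0
    exact pvMain n.toNat hN1 adjN hlenN
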